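/-
  THE SEGMENTS OF `GifMakeMapObject` (gifalloc.c:42-74; 107900H … 1079BEH, 61 instructions; NO protected frame): the assertions at
  its two cut points, the segment claims, and the COMPOSITION (segments ⇒ `GifMakeMapObject.spec`), proved here.

  THE CODE (gcc calls `GifBitSize` ONCE: the second call of l.65 re-uses the first result, kept in `r12d`):
      107900H  six pushes (r15 r14 r13 r12 rbp rbx), `sub rsp, 8`         rsp = RA − 56
      10790EH  `ebp = ColorCount`, `r13 = ColorMap`, `call GifBitSize`, `r12d = eax`, `(1 << r12d) != ebp` → 1079A7H (NULL)
      107929H  `malloc(24)` → `rbx`; NULL → 1079ACH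
      10793BH  CUT 1  `r15 = (long) ebp`, `calloc(r15, 3)` → `r14`, the checked store `Object->Colors = r14`
      10795BH  `r14 == NULL` → 10799AH: `free(rbx)`, `rbx = r14 (= 0)` → 1079ACH
      107960H  the three checked stores `ColorCount`, `BitsPerPixel`, `SortFlag`; `ColorMap != NULL`: `memcpy(r14, r13, 3 · r15)`
      1079ACH  CUT 2  `rax = rbx`, `add rsp, 8`, six pops, `ret`

  SEGMENTS (every path makes at most 3 contract calls: GifBitSize, malloc | calloc, memcpy | calloc, free):
      GifMakeMapObject.1   107900H … 10793BH and 1079A7H      22 instructions   GifBitSize, malloc      → `AfterMalloc` | `Done` (NULL)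
      GifMakeMapObject.2   10793BH … 1079A7H                  30 instructions   calloc, memcpy, free    → `Done`
      GifMakeMapObject.E   1079ACH … ret                       9 instructions   —                       → `Returned`

  THE HEAP CHANGES: after the successful `malloc(24)` the heap is `H.push 24 (r16 24)` and the object is `H.next`; the assertion
  `Done` carries the FINAL heap `Hc` as a parameter, with `H.Grew Hc` (what `MakeMapPost` asks).
-/
import Gif.Spec.Alloc
import Gif.LabelsAt
namespace Gif.Spec
open X86 X86.User Asan ProgX.Base ProgX.Base.Spec

namespace GifMakeMapObject

/-- **AFTER THE SUCCESSFUL `malloc(24)`** (at 10793BH, l.58), inside the call that was entered at the state `e` (return address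
`ret`) with the function's precondition. Six registers are saved, `rsp = RA − 56`; `rbx = Object = H.next`, the new object of the
heap `H.push 24 (r16 24)`; `ebp = ColorCount = count` (zero-extended), a power of two that passed the test of l.48: at least 2;
`r12d` = the result of GifBitSize (stored to `BitsPerPixel` later: no clause needs its value); `r13 = ColorMap`. Nothing was
written but the function's stack and the contract's windows (`malloc`: the control cell, the new header, the new shadow). -/
structure AfterMalloc (H : Heap) (rest : List Obj) (frames : List (Nat × FrameLayout)) (count : Nat) (u₀ e : State) (ret : Word)
    (v : State) : Prop where
  /-- the function was entered at `e` … -/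
  entry : AtEntry (conv u₀) Gif.L.GifMakeMapObject.entry (GifMakeMapObject.spec H rest frames count).frame ret e
  /-- … with its precondition -/
  pre : (GifMakeMapObject.spec H rest frames count).pre e
  rip : v.rip = Gif.L.GifMakeMapObject.at_10793b
  /-- six pushes and `sub rsp, 8` -/
  rsp : v.reg .rsp = e.reg .rsp - 56
  /-- `rbx = Object`: the result of `malloc(24)`, the new object of the heap -/
  rbx : (v.reg .rbx).toNat = H.next
  /-- `mov ebp, edi`: the count, zero-extended -/
  rbp : (v.reg .rbp).toNat = count
  /-- `mov r12d, eax`: the result of GifBitSize -/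
  r12 : (v.reg .r12).toNat ≤ 9
  /-- `mov r13, rsi`: the colours to copy, or NULL -/
  r13 : v.reg .r13 = e.reg .rsi
  /-- the saved registers, in push order -/
  slot_r15 : v.mem.readLE (e.reg .rsp - 8) 8 = (e.reg .r15).toNat
  slot_r14 : v.mem.readLE (e.reg .rsp - 16) 8 = (e.reg .r14).toNat
  slot_r13 : v.mem.readLE (e.reg .rsp - 24) 8 = (e.reg .r13).toNat
  slot_r12 : v.mem.readLE (e.reg .rsp - 32) 8 = (e.reg .r12).toNat
  slot_rbp : v.mem.readLE (e.reg .rsp - 40) 8 = (e.reg .rbp).toNat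
  slot_rbx : v.mem.readLE (e.reg .rsp - 48) 8 = (e.reg .rbx).toNat
  /-- the return address is still in its slot: segment 2 hands it on to `Done` (the `ret` at 1079BDH reads it) -/
  slot_ra : UInt64.ofNat (v.mem.readLE (e.reg .rsp) 8) = ret
  /-- l.48 passed: `count = 1 << GifBitSize(count)` with a result in 1 … 9 -/
  two : 2 ≤ count
  /-- the heap's invariant for the heap with the new object, the clean stack ending at the present stack pointer -/
  inv : HeapInv (H.push 24 (r16 24)) rest frames ((e.reg .rsp).toNat - 56) v.mem
  /-- nothing was written but the function's stack and the contract's windows -/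
  same : Mem.SameExcept
    [⟨(e.reg .rsp).toNat - 160, (e.reg .rsp).toNat⟩,
     ⟨0x800000, 0x800008⟩,
     ⟨H.next - 32, 0xC00000⟩,
     shadowSpan (H.next - 32) 0xC00000] e.mem v.mem
  code : (conv u₀).code.In v.mem
  abi : (conv u₀).inv v

/-- **BEFORE THE EPILOGUE** (at 1079ACH, l.74: every path joins here): the result is in `rbx`; the heap is `Hc`, grown from `H`;
the contract's postcondition (`MakeMapPost`) holds of the present memory with `rbx` for `rax` and the present stack pointer for
the caller's (the epilogue pops and returns: it writes nothing). The four ways to get here: l.49 (no power of two: `Hc = H`,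
`rbx = 0`), l.54 (`malloc` failed: `Hc = H`, `rbx = 0`), l.60-61 (`calloc` failed: `Hc = (H.push 24 32).release H.next`,
`rbx = 0`: `Heap.Grew.release_new` of Gif/Spec/HeapCarry.lean), l.64-70 (the map: `Hc` = `H` with the two new objects: `Heap.Grew.push` twice). -/
structure Done (H : Heap) (rest : List Obj) (frames : List (Nat × FrameLayout)) (count : Nat) (Hc : Heap) (u₀ e : State)
    (ret : Word) (v : State) : Prop where
  entry : AtEntry (conv u₀) Gif.L.GifMakeMapObject.entry (GifMakeMapObject.spec H rest frames count).frame ret e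
  pre : (GifMakeMapObject.spec H rest frames count).pre e
  rip : v.rip = Gif.L.GifMakeMapObject.at_1079ac
  rsp : v.reg .rsp = e.reg .rsp - 56
  /-- the saved registers, in push order: the six pops at 1079B3H … 1079BBH read them -/
  slot_r15 : v.mem.readLE (e.reg .rsp - 8) 8 = (e.reg .r15).toNat
  slot_r14 : v.mem.readLE (e.reg .rsp - 16) 8 = (e.reg .r14).toNat
  slot_r13 : v.mem.readLE (e.reg .rsp - 24) 8 = (e.reg .r13).toNat
  slot_r12 : v.mem.readLE (e.reg .rsp - 32) 8 = (e.reg .r12).toNat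
  slot_rbp : v.mem.readLE (e.reg .rsp - 40) 8 = (e.reg .rbp).toNat
  slot_rbx : v.mem.readLE (e.reg .rsp - 48) 8 = (e.reg .rbx).toNat
  /-- the return address is still in its slot: the `ret` at 1079BDH reads it -/
  slot_ra : UInt64.ofNat (v.mem.readLE (e.reg .rsp) 8) = ret
  /-- the present heap is the entry's after the function's allocations (and the `free` of its own first object) -/
  grew : H.Grew Hc
  inv : HeapInv Hc rest frames ((e.reg .rsp).toNat - 56) v.mem
  /-- the result in `rbx`: NULL, or the map, whose two objects are live, new, different, with the two fields a caller reads -/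
  res : (v.reg .rbx).toNat = 0 ∨
    ∃ colors,
      Hc.Live (v.reg .rbx).toNat 24 ∧ Hc.Live colors (3 * count) ∧
      H.next ≤ (v.reg .rbx).toNat ∧ H.next ≤ colors ∧ colors ≠ (v.reg .rbx).toNat ∧
      ColorMapObject.ColorCount v.mem (v.reg .rbx).toNat = count ∧
      ColorMapObject.Colors v.mem (v.reg .rbx).toNat = colors ∧
      2 ≤ count ∧ count ≤ 256
  same : Mem.SameExcept
    [⟨(e.reg .rsp).toNat - 160, (e.reg .rsp).toNat⟩,
     ⟨0x800000, 0x800008⟩,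
     ⟨H.next - 32, 0xC00000⟩,
     shadowSpan (H.next - 32) 0xC00000] e.mem v.mem
  code : (conv u₀).code.In v.mem
  abi : (conv u₀).inv v

/-- **Segment 1** (107900H … 10793BH, and 1079A7H; 22 instructions; l.42-56): the prologue, `GifBitSize(ColorCount)`, the test of
l.48 (no power of two: `rbx = 0`, to the join), `malloc(24)` (NULL: to the join with `rbx = 0`; the heap is `H` in both NULL arms:
`FailPost`). Otherwise: `AfterMalloc`. -/
def Seg1 (Lay : Layout) (μ : Microarch) (u₀ : State) : Prop :=
  ∀ (H : Heap) (rest : List Obj) (frames : List (Nat × FrameLayout)) (count : Nat) (e : State) (ret : Word),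
    AtEntry (conv u₀) Gif.L.GifMakeMapObject.entry (GifMakeMapObject.spec H rest frames count).frame ret e →
    (GifMakeMapObject.spec H rest frames count).pre e →
    ReachVia Lay μ WayInv e (fun w =>
      AfterMalloc H rest frames count u₀ e ret w ∨
      Done H rest frames count H u₀ e ret w)

/-- **Segment 2** (10793BH … 1079A7H; 30 instructions; l.57-72): `calloc(count, 3)`, the checked store of `Colors`; NULL:
`free(Object)`, `rbx = 0`; otherwise the three checked stores and, if `ColorMap != NULL`, `memcpy(Colors, ColorMap, 3 · count)`
(the destination is a new object: above every object of `H`, so the copy is ascending or disjoint). To the join, with the final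
heap. -/
def Seg2 (Lay : Layout) (μ : Microarch) (u₀ : State) : Prop :=
  ∀ (H : Heap) (rest : List Obj) (frames : List (Nat × FrameLayout)) (count : Nat) (e : State) (ret : Word) (v : State),
    AfterMalloc H rest frames count u₀ e ret v →
    ReachVia Lay μ WayInv v (fun w => ∃ Hc, Done H rest frames count Hc u₀ e ret w)

/-- **Segment E** (1079ACH … ret; 9 instructions; l.74): `rax = rbx`, `add rsp, 8`, six pops, `ret`: the contract's `Returned`
(`HeapPre.raise_back` lifts the heap's invariant to the caller's stack pointer). -/
def SegE (Lay : Layout) (μ : Microarch) (u₀ : State) : Prop :=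
  ∀ (H : Heap) (rest : List Obj) (frames : List (Nat × FrameLayout)) (count : Nat) (Hc : Heap) (e : State) (ret : Word)
    (v : State),
    Done H rest frames count Hc u₀ e ret v →
    ReachVia Lay μ WayInv v (Returned (conv u₀) (GifMakeMapObject.spec H rest frames count) e ret)

/-- **The composition of `GifMakeMapObject`**: the three segments chain into the function's contract. -/
theorem compose {Lay : Layout} {μ : Microarch} {u₀ : State} (h1 : Seg1 Lay μ u₀) (h2 : Seg2 Lay μ u₀) (hE : SegE Lay μ u₀) :
    ∀ (H : Heap) (rest : List Obj) (frames : List (Nat × FrameLayout)) (count : Nat),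
      Calls Lay μ WayInv (conv u₀) Gif.L.GifMakeMapObject.entry (GifMakeMapObject.spec H rest frames count) := by
  intro H rest frames count e ret he hp
  refine (h1 H rest frames count e ret he hp).trans ?_
  intro v hv
  rcases hv with hv | hv
  · refine (h2 H rest frames count e ret v hv).trans ?_
    intro w hw
    obtain ⟨Hc, hw⟩ := hw
    exact hE H rest frames count Hc e ret w hw
  · exact hE H rest frames count H e ret v hv

end GifMakeMapObject

end Gif.Spec
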